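-- pv_equiv track=rewrite | github.com/rafiq/Patterns-in-Real-World-Time-Series-Data | timeSeriesPatternFinder.py | get_unique_complexities
-- ===== SOURCE A (Python) =====
-- def get_unique_complexities(listOfTuples):
--     seen = {}
--     for listArray in listOfTuples:
--         currComplexity = listArray[2]
--         if currComplexity not in seen:
--             #  complexity key           max                min
--             seen[currComplexity] = [[listArray[0],listArray[1]],[listArray[0],listArray[1]]]
--         else:
--             seen[currComplexity][0] = [listArray[0],listArray[1]] if seen[currComplexity][0][1] < listArray[1] else seen[currComplexity][0]
--             seen[currComplexity][1] = [listArray[0],listArray[1]] if seen[currComplexity][1][1] > listArray[1] else seen[currComplexity][1]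
--     return list(seen.items())
-- ===== SOURCE B (Python) =====
-- def _extremes(g):
--     mx = max(g, key=lambda p: p[1])
--     mn = min(g, key=lambda p: p[1])
--     return [[mx[0], mx[1]], [mn[0], mn[1]]]
--
--
-- def get_unique_complexities(listOfTuples):
--     groups = {}
--     for t in listOfTuples:
--         groups.setdefault(t[2], []).append(t)
--     return [(k, _extremes(g)) for k, g in groups.items()]
-- ===== Notes on version B (the rewrite author's own statement) =====
-- stated objective: idiomatic
-- what changed: A's single pass with hand-maintained running max/min lists per key is replaced by a group-by (setdefault/append) followed by builtin max()/min() with key=p[1] per group, relying on their first-on-tie semantics to match A's strict comparisons.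
import Mathlib
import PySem

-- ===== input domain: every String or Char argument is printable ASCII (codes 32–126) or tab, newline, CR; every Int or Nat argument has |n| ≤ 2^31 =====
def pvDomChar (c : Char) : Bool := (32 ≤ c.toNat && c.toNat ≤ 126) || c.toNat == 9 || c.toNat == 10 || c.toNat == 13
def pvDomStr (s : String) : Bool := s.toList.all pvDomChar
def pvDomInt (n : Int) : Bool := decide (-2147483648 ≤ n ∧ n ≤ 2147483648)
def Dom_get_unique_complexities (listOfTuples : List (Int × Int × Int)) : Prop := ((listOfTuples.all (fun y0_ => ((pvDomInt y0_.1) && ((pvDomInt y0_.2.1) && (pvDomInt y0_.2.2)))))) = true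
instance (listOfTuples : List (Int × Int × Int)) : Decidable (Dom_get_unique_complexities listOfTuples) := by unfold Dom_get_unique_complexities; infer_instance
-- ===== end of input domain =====

-- B replaces A's hand-maintained running max/min per key by a group-by followed by
-- builtin max/min per group (objective: idiomatic); equal return value on all inputs.

-- ===== PORT A =====
-- the loop body of A; seen[c][i] indexing via pyGet? (always in range by construction,
-- so the .getD defaults are never used)
def pvSeenStep (seen : PySem.Dict Int (List (List Int))) (listArray : Int × Int × Int) :
    PySem.Dict Int (List (List Int)) :=
  let currComplexity := listArray.2.2
  if seen.contains currComplexity = false then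
    seen.insert currComplexity [[listArray.1, listArray.2.1], [listArray.1, listArray.2.1]]
  else
    let v := seen.getD currComplexity []
    let v0 := (PySem.List.pyGet? v 0).getD []
    let v1 := (PySem.List.pyGet? v 1).getD []
    let v0' := if (PySem.List.pyGet? v0 1).getD 0 < listArray.2.1
               then [listArray.1, listArray.2.1] else v0
    let v1' := if (PySem.List.pyGet? v1 1).getD 0 > listArray.2.1
               then [listArray.1, listArray.2.1] else v1
    seen.insert currComplexity [v0', v1']

def get_unique_complexities (listOfTuples : List (Int × Int × Int)) : List (Int × List (List Int)) :=
  (listOfTuples.foldl pvSeenStep (PySem.Dict.empty : PySem.Dict Int (List (List Int)))).items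

-- ===== PORT B =====
-- _extremes: builtin max/min with key=p[1] (first extremal element, as in Python);
-- the [] branch is unreachable since every group is nonempty (Python would raise there)
def pvExtremes (g : List (Int × Int × Int)) : List (List Int) :=
  match PySem.List.max? g (fun p => p.2.1), PySem.List.min? g (fun p => p.2.1) with
  | some mx, some mn => [[mx.1, mx.2.1], [mn.1, mn.2.1]]
  | _, _ => []

-- groups.setdefault(t[2], []).append(t)
def pvGroupStep (groups : PySem.Dict Int (List (Int × Int × Int))) (t : Int × Int × Int) :
    PySem.Dict Int (List (Int × Int × Int)) :=
  groups.modify t.2.2 [] (fun g => g ++ [t])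

def get_unique_complexities_alt (listOfTuples : List (Int × Int × Int)) : List (Int × List (List Int)) :=
  let groups := listOfTuples.foldl pvGroupStep (PySem.Dict.empty : PySem.Dict Int (List (Int × Int × Int)))
  groups.items.map (fun kg => (kg.1, pvExtremes kg.2))

-- ===== PRECONDITION & SPEC =====
def Spec_get_unique_complexities (listOfTuples : List (Int × Int × Int)) (out : List (Int × List (List Int))) : Prop := out = get_unique_complexities_alt listOfTuples
instance (listOfTuples : List (Int × Int × Int)) (out : List (Int × List (List Int))) : Decidable (Spec_get_unique_complexities listOfTuples out) := by unfold Spec_get_unique_complexities; infer_instance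

-- ===== CLAIM (what is proved, stated in full; the proofs are below) =====
def Claim_equal_get_unique_complexities : Prop := ∀ (listOfTuples : List (Int × Int × Int)), Dom_get_unique_complexities listOfTuples → Spec_get_unique_complexities listOfTuples (get_unique_complexities listOfTuples)

-- ===== LEMMAS AND PROOFS =====

-- the value-wise relation between A's dict and B's dict
def pvRel (p : Int × List (Int × Int × Int)) : Int × List (List Int) := (p.1, pvExtremes p.2)

lemma pv_contains_rel (dA : PySem.Dict Int (List (List Int)))
    (dB : PySem.Dict Int (List (Int × Int × Int)))
    (hmap : dA.items = dB.items.map pvRel) (c : Int) :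
    dA.contains c = dB.contains c := by
  simp [PySem.Dict.contains, hmap, List.any_map, Function.comp_def, pvRel]

lemma pv_get?_rel (dA : PySem.Dict Int (List (List Int)))
    (dB : PySem.Dict Int (List (Int × Int × Int)))
    (hmap : dA.items = dB.items.map pvRel) (c : Int) :
    dA.get? c = (dB.get? c).map pvExtremes := by
  simp [PySem.Dict.get?, hmap, List.find?_map, Function.comp_def, pvRel]

lemma pv_step_rel (dA : PySem.Dict Int (List (List Int)))
    (dB : PySem.Dict Int (List (Int × Int × Int)))
    (hmap : dA.items = dB.items.map pvRel)
    (hne : ∀ p ∈ dB.items, p.2 ≠ []) (t : Int × Int × Int) :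
    (pvSeenStep dA t).items = (pvGroupStep dB t).items.map pvRel ∧
      ∀ p ∈ (pvGroupStep dB t).items, p.2 ≠ [] := by
  have hcont := pv_contains_rel dA dB hmap t.2.2
  have hget := pv_get?_rel dA dB hmap t.2.2
  by_cases h : dB.contains t.2.2 = true
  · -- key already present: B appends to the group, A updates the running extremes
    have hsome : (dB.get? t.2.2).isSome := by
      rw [← PySem.Dict.contains_eq_isSome_get?]; exact h
    obtain ⟨g, hg⟩ := Option.isSome_iff_exists.mp hsome
    have hfind : ∃ pr ∈ dB.items, pr.2 = g ∧ pr.1 = t.2.2 := by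
      simp only [PySem.Dict.get?, Option.map_eq_some_iff] at hg
      obtain ⟨pr, hpr, h2⟩ := hg
      exact ⟨pr, List.mem_of_find?_eq_some hpr, h2, by
        have := List.find?_some hpr; simpa using this⟩
    obtain ⟨pr, hprmem, hpr2, hpr1⟩ := hfind
    have hgne : g ≠ [] := hpr2 ▸ hne pr hprmem
    have hmxS : (PySem.List.max? g (fun p => p.2.1)).isSome := by
      rcases hh : PySem.List.max? g (fun p => p.2.1) with _ | _
      · exact absurd ((PySem.List.max?_eq_none_iff _ _).mp hh) hgne
      · rfl
    have hmnS : (PySem.List.min? g (fun p => p.2.1)).isSome := by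
      rcases hh : PySem.List.min? g (fun p => p.2.1) with _ | _
      · exact absurd ((PySem.List.min?_eq_none_iff _ _).mp hh) hgne
      · rfl
    obtain ⟨mx, hmx⟩ := Option.isSome_iff_exists.mp hmxS
    obtain ⟨mn, hmn⟩ := Option.isSome_iff_exists.mp hmnS
    have hmx' : PySem.List.max? (g ++ [t]) (fun p => p.2.1)
        = if mx.2.1 < t.2.1 then some t else some mx := by
      simp only [PySem.List.max?] at hmx ⊢
      rw [List.foldl_append, hmx]; simp [List.foldl]
    have hmn' : PySem.List.min? (g ++ [t]) (fun p => p.2.1)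
        = if mn.2.1 > t.2.1 then some t else some mn := by
      simp only [PySem.List.min?] at hmn ⊢
      rw [List.foldl_append, hmn]; simp [List.foldl]
    have hB : pvGroupStep dB t = dB.insert t.2.2 (g ++ [t]) := by
      simp [pvGroupStep, PySem.Dict.modify, PySem.Dict.getD, hg]
    have hA : pvSeenStep dA t
        = dA.insert t.2.2
            [if mx.2.1 < t.2.1 then [t.1, t.2.1] else [mx.1, mx.2.1],
             if mn.2.1 > t.2.1 then [t.1, t.2.1] else [mn.1, mn.2.1]] := by
      have hgetD : dA.getD t.2.2 [] = [[mx.1, mx.2.1], [mn.1, mn.2.1]] := by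
        simp [PySem.Dict.getD, hget, hg, pvExtremes, hmx, hmn]
      simp [pvSeenStep, hcont, h, hgetD, PySem.List.pyGet?, PySem.List.pyIdx?]
    have hExt : pvExtremes (g ++ [t])
        = [if mx.2.1 < t.2.1 then [t.1, t.2.1] else [mx.1, mx.2.1],
           if mn.2.1 > t.2.1 then [t.1, t.2.1] else [mn.1, mn.2.1]] := by
      unfold pvExtremes
      rw [hmx', hmn']
      split_ifs <;> rfl
    have hcontA : dA.contains t.2.2 = true := hcont.trans h
    constructor
    · rw [hA, hB, PySem.Dict.items_insert_of_contains _ _ hcontA,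
        PySem.Dict.items_insert_of_contains _ _ h, hmap,
        List.map_map, List.map_map]
      refine List.map_congr_left ?_
      intro p _
      by_cases hc : p.1 == t.2.2 <;> simp [pvRel, Function.comp, hc, hExt]
    · intro p hp
      rw [hB, PySem.Dict.items_insert_of_contains _ _ h] at hp
      obtain ⟨q, hq, rfl⟩ := List.mem_map.mp hp
      by_cases hc : q.1 == t.2.2 <;> simp [hc]
      exact hne q hq
  · -- fresh key: both sides append a new entry
    have hnone : dB.get? t.2.2 = none := by
      rcases hh : dB.get? t.2.2 with _ | v
      · rfl
      · exact absurd (by rw [PySem.Dict.contains_eq_isSome_get?, hh]; rfl) h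
    have hB : pvGroupStep dB t = dB.insert t.2.2 [t] := by
      simp [pvGroupStep, PySem.Dict.modify, PySem.Dict.getD, hnone]
    have hcontA : dA.contains t.2.2 = false := by
      rw [hcont]; simpa using h
    have hA : pvSeenStep dA t
        = dA.insert t.2.2 [[t.1, t.2.1], [t.1, t.2.1]] := by
      simp [pvSeenStep, hcontA]
    have hcontB : dB.contains t.2.2 = false := by simpa using h
    constructor
    · rw [hA, hB, PySem.Dict.items_insert_of_not_contains _ _ hcontA,
        PySem.Dict.items_insert_of_not_contains _ _ hcontB, hmap, List.map_append]
      simp [pvRel, pvExtremes, PySem.List.max?, PySem.List.min?]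
    · intro p hp
      rw [hB, PySem.Dict.items_insert_of_not_contains _ _ hcontB] at hp
      rcases List.mem_append.mp hp with hp | hp
      · exact hne p hp
      · simp at hp; simp [hp]

lemma pv_loop_inv (l : List (Int × Int × Int))
    (dA : PySem.Dict Int (List (List Int)))
    (dB : PySem.Dict Int (List (Int × Int × Int)))
    (hmap : dA.items = dB.items.map pvRel)
    (hne : ∀ p ∈ dB.items, p.2 ≠ []) :
    (l.foldl pvSeenStep dA).items = (l.foldl pvGroupStep dB).items.map pvRel := by
  induction l generalizing dA dB with
  | nil => simpa using hmap
  | cons t l ih =>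
    obtain ⟨h1, h2⟩ := pv_step_rel dA dB hmap hne t
    exact ih _ _ h1 h2

-- ===== VERDICT (by name: the statement is the Claim_ definition above) =====
theorem get_unique_complexities_spec : Claim_equal_get_unique_complexities := by
  intro l _
  unfold Spec_get_unique_complexities get_unique_complexities get_unique_complexities_alt
  have h := pv_loop_inv l PySem.Dict.empty PySem.Dict.empty (by rfl) (by intro p hp; simp [PySem.Dict.empty] at hp)
  simpa [pvRel] using h
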